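-- pv_equiv track=rewrite | github.com/justcyl/password_analysis_exp | analysis/username_transform_rules.py | ensure_category_order
-- ===== SOURCE A (Python) =====
-- from typing import Dict, List, Set, Tuple
--
-- def ensure_category_order(categories: Set[str]) -> List[str]:
--     preferred = [
--         "exact_case_sensitive",
--         "exact_casefold",
--         "suffix_digits",
--         "suffix_append",
--         "prefix_digits",
--         "prefix_append",
--         "contains_username",
--         "reverse_username",
--         "leet_substitution",
--         "repeated_username",
--         "wrap_username",
--         "edit_distance_1",
--         "edit_distance_2",
--         "no_relation",
--     ]
--     ordered = [c for c in preferred if c in categories]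
--     for c in sorted(categories):
--         if c not in preferred:
--             ordered.append(c)
--     return ordered
-- ===== SOURCE B (Python) =====
-- def ensure_category_order(categories):
--     preferred = [
--         "exact_case_sensitive",
--         "exact_casefold",
--         "suffix_digits",
--         "suffix_append",
--         "prefix_digits",
--         "prefix_append",
--         "contains_username",
--         "reverse_username",
--         "leet_substitution",
--         "repeated_username",
--         "wrap_username",
--         "edit_distance_1",
--         "edit_distance_2",
--         "no_relation",
--     ]
--     rank = {c: i for i, c in enumerate(preferred)}
--     default = len(preferred)
--     return sorted(categories, key=lambda c: (rank.get(c, default), c))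
-- ===== Notes on version B (the rewrite author's own statement) =====
-- stated objective: simpler
-- what changed: Replaces A's two-phase construction (filter the preferred list by membership, then append the sorted non-preferred remainder in a loop) with one sorted() call over the whole set keyed by (precomputed-rank-or-len(preferred), name).
import Mathlib
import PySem

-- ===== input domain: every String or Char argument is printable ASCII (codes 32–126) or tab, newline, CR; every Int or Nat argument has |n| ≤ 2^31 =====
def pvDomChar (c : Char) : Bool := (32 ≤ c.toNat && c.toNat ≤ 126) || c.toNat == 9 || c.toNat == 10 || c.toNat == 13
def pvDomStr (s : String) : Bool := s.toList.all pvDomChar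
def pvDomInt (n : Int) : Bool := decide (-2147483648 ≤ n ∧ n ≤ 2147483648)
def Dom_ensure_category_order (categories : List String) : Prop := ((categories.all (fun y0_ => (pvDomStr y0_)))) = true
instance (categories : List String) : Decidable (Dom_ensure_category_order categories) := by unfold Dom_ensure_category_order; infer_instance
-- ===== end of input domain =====

-- B replaces A's two-phase build (filter the preferred list, then append the sorted remainder in a
-- loop) with ONE keyed sort over the whole set using a precomputed rank table; same output list.

-- the preferred-order literal both Pythons write out inline
def pvPreferred : List String :=
  [ "exact_case_sensitive", "exact_casefold", "suffix_digits", "suffix_append",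
    "prefix_digits", "prefix_append", "contains_username", "reverse_username",
    "leet_substitution", "repeated_username", "wrap_username", "edit_distance_1",
    "edit_distance_2", "no_relation" ]

-- ===== PORT A =====
def ensure_category_order (categories : List String) : List String :=
  let preferred := pvPreferred
  let ordered := preferred.filter (fun c => categories.contains c)
  (PySem.List.sorted categories (fun c => c) false).foldl
    (fun ordered c => if preferred.contains c then ordered else ordered ++ [c]) ordered

-- ===== PORT B =====
def ensure_category_order_alt (categories : List String) : List String :=
  let preferred := pvPreferred
  let rank : PySem.Dict String Int :=
    (PySem.List.enumerate preferred 0).foldl (fun d p => d.insert p.2 p.1) PySem.Dict.empty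
  let dflt : Int := preferred.length
  PySem.List.sorted2 categories (fun c => rank.getD c dflt) (fun c => c) false

-- ===== PRECONDITION & SPEC =====
-- Pre_ excludes lists with duplicate strings: the Python parameter is a set, so a duplicate-carrying
-- list does not represent any Python input (the set convention maps a set to its distinct elements).
def Pre_ensure_category_order (categories : List String) : Prop := categories.Nodup
instance (categories : List String) : Decidable (Pre_ensure_category_order categories) := by
  unfold Pre_ensure_category_order; infer_instance

def pvWitness_ensure_category_order : List String := ["zzz", "exact_casefold", "alpha"]

def Spec_ensure_category_order (categories : List String) (out : List String) : Prop := out = ensure_category_order_alt categories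
instance (categories : List String) (out : List String) : Decidable (Spec_ensure_category_order categories out) := by unfold Spec_ensure_category_order; infer_instance

-- ===== CLAIM (what is proved, stated in full; the proofs are below) =====
def Claim_equal_ensure_category_order : Prop := ∀ (categories : List String), Dom_ensure_category_order categories → Pre_ensure_category_order categories → Spec_ensure_category_order categories (ensure_category_order categories)

-- ===== LEMMAS AND PROOFS =====

-- the rank table B builds, as a closed term
def pvRank : PySem.Dict String Int :=
  (PySem.List.enumerate pvPreferred 0).foldl (fun d p => d.insert p.2 p.1) PySem.Dict.empty

-- the single sort key of B, read through the lex order on (rank, name)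
def pvKey (c : String) : Lex (Int × String) := toLex (pvRank.getD c 14, c)

-- sorted2 with linear-order keys IS sorted with the lexicographic pair key
theorem pv_sorted2_eq_sorted_lex {α : Type} (xs : List α) (k1 : α → Int) (k2 : α → String) :
    PySem.List.sorted2 xs k1 k2 false =
      PySem.List.sorted xs (fun x => toLex (k1 x, k2 x)) false := by
  unfold PySem.List.sorted2 PySem.List.sorted
  simp only [Bool.false_eq_true, if_false]
  have hbefore :
      (fun a b => decide (k1 a < k1 b) || (!decide (k1 b < k1 a) && decide (k2 a < k2 b)))
        = (fun a b => decide ((fun x => toLex (k1 x, k2 x)) a < (fun x => toLex (k1 x, k2 x)) b)) := by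
    funext a b
    by_cases h1 : k1 a < k1 b
    · simp [h1, Prod.Lex.lt_iff]
    · by_cases h2 : k1 b < k1 a
      · have hne : ¬ k1 a = k1 b := by omega
        simp [h1, h2, Prod.Lex.lt_iff, hne]
      · have heq : k1 a = k1 b := by omega
        simp [Prod.Lex.lt_iff, heq]
  rw [hbefore]

theorem pv_alt_eq_sorted (categories : List String) :
    ensure_category_order_alt categories = PySem.List.sorted categories pvKey false := by
  show PySem.List.sorted2 categories (fun c => pvRank.getD c (14 : Int)) (fun c => c) false = _
  rw [pv_sorted2_eq_sorted_lex]
  rfl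

theorem pv_a_eq_append (categories : List String) :
    ensure_category_order categories =
      pvPreferred.filter (fun c => categories.contains c)
        ++ ((PySem.List.sorted categories (fun c => c) false).filter
              (fun c => !pvPreferred.contains c)) := by
  show (PySem.List.sorted categories (fun c => c) false).foldl
      (fun ordered c => if pvPreferred.contains c then ordered else ordered ++ [c])
      (pvPreferred.filter (fun c => categories.contains c)) = _
  have hfun : (fun (ordered : List String) c => if pvPreferred.contains c then ordered else ordered ++ [c])
      = (fun acc c => if (!pvPreferred.contains c) = true then acc ++ [(fun x => x) c] else acc) := by
    funext acc c
    cases hb : pvPreferred.contains c <;> simp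
  rw [hfun, PySem.List.foldl_append_if]
  simp

-- rank facts (pvRank and pvPreferred are closed literals)
theorem pv_rank_mem : ∀ a ∈ pvPreferred, pvRank.getD a 14 < 14 := by decide
theorem pv_rank_pairwise : pvPreferred.Pairwise (fun a b => pvRank.getD a 14 < pvRank.getD b 14) := by decide
theorem pv_preferred_nodup : pvPreferred.Nodup := by decide
theorem pv_rank_keys : pvRank.keys = pvPreferred := by decide

theorem pv_rank_not_mem (a : String) (ha : a ∉ pvPreferred) : pvRank.getD a 14 = 14 := by
  apply PySem.Dict.getD_of_not_contains
  rw [PySem.Dict.contains_eq_decide_mem_keys, pv_rank_keys]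
  simpa using ha

-- the key is strictly increasing along A's output list (given distinct inputs)
theorem pv_a_pairwise (categories : List String) (hnd : categories.Nodup) :
    (ensure_category_order categories).Pairwise (fun a b => pvKey a < pvKey b) := by
  rw [pv_a_eq_append]
  rw [List.pairwise_append]
  refine ⟨?_, ?_, ?_⟩
  · -- within the preferred part: ranks strictly increase
    have h := List.Pairwise.sublist (List.filter_sublist (p := fun c => categories.contains c) (l := pvPreferred)) pv_rank_pairwise
    exact h.imp (fun hr => by simp [pvKey, Prod.Lex.lt_iff]; omega)
  · -- within the remainder: equal rank 14, names strictly increase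
    have hle : (PySem.List.sorted categories (fun c => c) false).Pairwise (fun a b => a ≤ b) :=
      PySem.List.sorted_pairwise categories (fun c => c)
    have hnd' : (PySem.List.sorted categories (fun c => c) false).Nodup :=
      (PySem.List.sorted_perm categories (fun c => c) false).nodup_iff.mpr hnd
    have hlt : (PySem.List.sorted categories (fun c => c) false).Pairwise (fun a b => a < b) :=
      (hle.and hnd').imp (fun ⟨h1, h2⟩ => lt_of_le_of_ne h1 h2)
    have hflt := List.Pairwise.sublist (List.filter_sublist (p := fun c => !pvPreferred.contains c)) hlt
    refine hflt.imp_of_mem (fun {a b} hma hmb hab => ?_)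
    have ha : a ∉ pvPreferred := by
      have := List.of_mem_filter hma; simpa using this
    have hb : b ∉ pvPreferred := by
      have := List.of_mem_filter hmb; simpa using this
    simp [pvKey, Prod.Lex.lt_iff, pv_rank_not_mem a ha, pv_rank_not_mem b hb, hab]
  · -- across: preferred rank < 14 = non-preferred rank
    intro a hma b hmb
    have ha : a ∈ pvPreferred := List.mem_of_mem_filter hma
    have hb : b ∉ pvPreferred := by
      have := List.of_mem_filter hmb; simpa using this
    have h1 : pvRank.getD a 14 < 14 := pv_rank_mem a ha
    have h2 : pvRank.getD b 14 = 14 := pv_rank_not_mem b hb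
    simp [pvKey, Prod.Lex.lt_iff]; omega

-- A's output is a rearrangement of the input list (given distinct inputs)
theorem pv_a_perm (categories : List String) (hnd : categories.Nodup) :
    (ensure_category_order categories).Perm categories := by
  rw [pv_a_eq_append]
  have h2 : ((PySem.List.sorted categories (fun c => c) false).filter
        (fun c => !pvPreferred.contains c)).Perm
      (categories.filter (fun c => !pvPreferred.contains c)) :=
    (PySem.List.sorted_perm categories (fun c => c) false).filter _
  have h1 : (pvPreferred.filter (fun c => categories.contains c)).Perm
      (categories.filter (fun c => pvPreferred.contains c)) := by
    rw [List.perm_ext_iff_of_nodup (pv_preferred_nodup.filter _) (hnd.filter _)]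
    intro a
    simp [List.mem_filter, and_comm]
  exact (h1.append h2).trans (List.filter_append_perm _ categories)

-- ===== VERDICT (by name: the statement is the Claim_ definition above) =====
theorem ensure_category_order_spec : Claim_equal_ensure_category_order := by
  intro categories _ hpre
  show ensure_category_order categories = ensure_category_order_alt categories
  rw [pv_alt_eq_sorted]
  exact (PySem.List.sorted_eq_of_perm_of_pairwise_lt categories _ pvKey
    (pv_a_perm categories hpre) (pv_a_pairwise categories hpre)).symm
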